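-- pv_equiv track=rewrite | github.com/sgarrow/cluster | cluster.py | iBelong
-- ===== SOURCE A (Python) =====
-- def iBelong( currBp, currCL ):
--     rtnVal = 0 # Assume it doesn't touch anybody till proven otherwise.
--     for pixelInClust in currCL:
--         delX = currBp[ 0 ] - pixelInClust[ 0 ]
--         delY = currBp[ 1 ] - pixelInClust[ 1 ]
--         if (abs(delX) < 2) and (abs(delY) < 2):
--             rtnVal = 1
--             break
--     return rtnVal
-- ===== SOURCE B (Python) =====
-- def iBelong(currBp, currCL):
--     clustSet = {(p[0], p[1]) for p in currCL}
--     for dx in (-1, 0, 1):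
--         for dy in (-1, 0, 1):
--             if (currBp[0] + dx, currBp[1] + dy) in clustSet:
--                 return 1
--     return 0
-- ===== Notes on version B (the rewrite author's own statement) =====
-- stated objective: alternative
-- what changed: B builds a hash set of cluster coordinates once and probes the fixed 9-cell neighborhood of the point, instead of scanning the whole cluster list computing coordinate deltas.
import Mathlib
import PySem

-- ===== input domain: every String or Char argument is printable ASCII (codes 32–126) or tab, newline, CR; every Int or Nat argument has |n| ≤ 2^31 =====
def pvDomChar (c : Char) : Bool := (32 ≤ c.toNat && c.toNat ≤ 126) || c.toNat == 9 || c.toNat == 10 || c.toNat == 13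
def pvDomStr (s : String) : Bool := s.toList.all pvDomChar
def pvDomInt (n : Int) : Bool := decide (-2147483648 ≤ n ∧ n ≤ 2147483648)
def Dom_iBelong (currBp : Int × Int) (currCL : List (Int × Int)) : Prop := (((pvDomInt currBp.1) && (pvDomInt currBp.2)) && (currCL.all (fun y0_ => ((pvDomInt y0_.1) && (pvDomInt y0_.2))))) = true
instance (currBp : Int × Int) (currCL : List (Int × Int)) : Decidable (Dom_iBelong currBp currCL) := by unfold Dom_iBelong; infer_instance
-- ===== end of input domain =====

-- B builds the set of cluster coordinates once and probes the fixed 9-cell neighborhood of the point,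
-- instead of scanning the whole cluster computing coordinate deltas (alternative decomposition).


-- ===== PORT A =====
-- the 'for … break' loop: scan currCL, set rtnVal = 1 and stop at the first pixel within Chebyshev distance 1
def iBelongLoop (currBp : Int × Int) : List (Int × Int) → Int
  | [] => 0
  | pixelInClust :: rest =>
    let delX := currBp.1 - pixelInClust.1
    let delY := currBp.2 - pixelInClust.2
    if |delX| < 2 ∧ |delY| < 2 then 1 else iBelongLoop currBp rest

def iBelong (currBp : Int × Int) (currCL : List (Int × Int)) : Int :=
  iBelongLoop currBp currCL

-- ===== PORT B =====
def iBelong_alt (currBp : Int × Int) (currCL : List (Int × Int)) : Int :=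
  let clustSet : PySem.Set (Int × Int) := PySem.Set.ofList currCL
  if [(-1 : Int), 0, 1].any (fun dx =>
       [(-1 : Int), 0, 1].any (fun dy =>
         PySem.Set.contains clustSet (currBp.1 + dx, currBp.2 + dy)))
  then 1 else 0

-- ===== PRECONDITION & SPEC =====
def Spec_iBelong (currBp : Int × Int) (currCL : List (Int × Int)) (out : Int) : Prop := out = iBelong_alt currBp currCL
instance (currBp : Int × Int) (currCL : List (Int × Int)) (out : Int) : Decidable (Spec_iBelong currBp currCL out) := by unfold Spec_iBelong; infer_instance

-- ===== CLAIM (what is proved, stated in full; the proofs are below) =====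
def Claim_equal_iBelong : Prop := ∀ (currBp : Int × Int) (currCL : List (Int × Int)), Dom_iBelong currBp currCL → Spec_iBelong currBp currCL (iBelong currBp currCL)

-- ===== LEMMAS AND PROOFS =====

-- A's loop returns 1 exactly when some cluster pixel is within Chebyshev distance 1
theorem iBelongLoop_eq_ite (currBp : Int × Int) (currCL : List (Int × Int)) :
    iBelongLoop currBp currCL =
      if ∃ p ∈ currCL, |currBp.1 - p.1| < 2 ∧ |currBp.2 - p.2| < 2 then 1 else 0 := by
  induction currCL with
  | nil => simp [iBelongLoop]
  | cons p rest ih =>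
    simp only [iBelongLoop, ih]
    by_cases h : |currBp.1 - p.1| < 2 ∧ |currBp.2 - p.2| < 2
    · rw [if_pos h, if_pos ⟨p, List.mem_cons_self, h⟩]
    · rw [if_neg h]
      have hiff : (∃ q ∈ p :: rest, |currBp.1 - q.1| < 2 ∧ |currBp.2 - q.2| < 2)
          ↔ (∃ q ∈ rest, |currBp.1 - q.1| < 2 ∧ |currBp.2 - q.2| < 2) := by
        constructor
        · rintro ⟨q, hq, hP⟩
          rcases List.mem_cons.mp hq with rfl | hq
          · exact absurd hP h
          · exact ⟨q, hq, hP⟩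
        · rintro ⟨q, hq, hP⟩
          exact ⟨q, List.mem_cons_of_mem _ hq, hP⟩
      rw [if_congr hiff rfl rfl]

-- B's 9-cell probe succeeds exactly when some cluster pixel is within Chebyshev distance 1
theorem probe_iff (currBp : Int × Int) (currCL : List (Int × Int)) :
    ([(-1 : Int), 0, 1].any (fun dx =>
       [(-1 : Int), 0, 1].any (fun dy =>
         PySem.Set.contains (PySem.Set.ofList currCL) (currBp.1 + dx, currBp.2 + dy))) = true)
    ↔ ∃ p ∈ currCL, |currBp.1 - p.1| < 2 ∧ |currBp.2 - p.2| < 2 := by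
  simp only [List.any_eq_true, PySem.Set.contains_iff, PySem.Set.mem_ofList]
  constructor
  · rintro ⟨dx, hdx, dy, hdy, hmem⟩
    simp only [List.mem_cons, List.not_mem_nil, or_false] at hdx hdy
    refine ⟨(currBp.1 + dx, currBp.2 + dy), hmem, ?_, ?_⟩ <;>
      · simp only [abs_lt]; omega
  · rintro ⟨⟨px, py⟩, hmem, hx, hy⟩
    simp only [abs_lt] at hx hy
    refine ⟨px - currBp.1, ?_, py - currBp.2, ?_, ?_⟩
    · simp only [List.mem_cons, List.not_mem_nil, or_false]; omega
    · simp only [List.mem_cons, List.not_mem_nil, or_false]; omega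
    · have : (currBp.1 + (px - currBp.1), currBp.2 + (py - currBp.2)) = (px, py) := by
        simp
      rw [this]; exact hmem

-- ===== VERDICT (by name: the statement is the Claim_ definition above) =====
theorem iBelong_spec : Claim_equal_iBelong := by
  intro currBp currCL _
  unfold Spec_iBelong iBelong iBelong_alt
  rw [iBelongLoop_eq_ite]
  by_cases h : ∃ p ∈ currCL, |currBp.1 - p.1| < 2 ∧ |currBp.2 - p.2| < 2
  · rw [if_pos h, if_pos ((probe_iff currBp currCL).mpr h)]
  · rw [if_neg h, if_neg (fun hc => h ((probe_iff currBp currCL).mp hc))]
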